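-- pv_equiv track=rewrite | github.com/SZNASKME/AutomateDEV | Stonebranch/Convert/CleanSourceFile/cleanFile.py | _collapse_blank_line_runs
-- ===== SOURCE A (Python) =====
-- def _collapse_blank_line_runs(lines: list[str], threshold: int = 2, keep: int = 1) -> list[str]:
--     """If a blank-line run is longer than threshold, keep only `keep` blank lines."""
--     if threshold < 0:
--         threshold = 0
--     if keep < 0:
--         keep = 0
--
--     out: list[str] = []
--     i = 0
--     while i < len(lines):
--         if lines[i].strip() != '':
--             out.append(lines[i])
--             i += 1
--             continue
--
--         j = i
--         while j < len(lines) and lines[j].strip() == '':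
--             j += 1
--         run_len = j - i
--
--         if run_len > threshold:
--             out.extend([''] * keep)
--         else:
--             out.extend([''] * run_len)
--
--         i = j
--
--     return out
-- ===== SOURCE B (Python) =====
-- def _collapse_blank_line_runs(lines: list[str], threshold: int = 2, keep: int = 1) -> list[str]:
--     """Single flat pass with a pending-blank counter instead of a nested run-scan."""
--     if threshold < 0:
--         threshold = 0
--     if keep < 0:
--         keep = 0
--     out: list[str] = []
--     blank = 0
--     for line in lines:
--         if line.strip() == '':
--             blank += 1
--         else:
--             out.extend([''] * (keep if blank > threshold else blank))
--             blank = 0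
--             out.append(line)
--     out.extend([''] * (keep if blank > threshold else blank))
--     return out
-- ===== Notes on version B (the rewrite author's own statement) =====
-- stated objective: simpler
-- what changed: Replaced A's nested while loops (inner scan measuring each blank run, then an index jump) with a single flat pass that maintains a pending-blank counter and flushes it on each non-blank line and once at the end.
import Mathlib
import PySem

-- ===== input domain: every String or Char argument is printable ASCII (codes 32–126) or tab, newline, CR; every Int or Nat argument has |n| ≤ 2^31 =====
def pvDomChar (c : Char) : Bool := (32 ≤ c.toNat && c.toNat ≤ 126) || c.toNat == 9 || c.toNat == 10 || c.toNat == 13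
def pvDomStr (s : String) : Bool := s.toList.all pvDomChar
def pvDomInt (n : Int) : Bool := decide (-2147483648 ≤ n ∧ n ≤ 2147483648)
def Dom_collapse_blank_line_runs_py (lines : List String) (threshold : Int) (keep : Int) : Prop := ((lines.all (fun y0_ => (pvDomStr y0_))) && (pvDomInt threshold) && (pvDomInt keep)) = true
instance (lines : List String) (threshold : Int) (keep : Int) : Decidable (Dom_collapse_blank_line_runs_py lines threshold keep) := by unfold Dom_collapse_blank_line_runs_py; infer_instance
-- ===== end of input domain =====

-- ===== PORT A =====
-- B collapses blank runs in one flat pass with a pending-blank counter instead of A's nested run-scan (alternative decomposition, same cost).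
-- blank-line test: line.strip() == ''
def pvBlank (s : String) : Bool := PySem.Str.strip s == ""

-- inner while: count of leading blank lines
def pvRunLenA : List String → Nat
  | [] => 0
  | x :: xs => if pvBlank x then pvRunLenA xs + 1 else 0

theorem pvRunLenA_pos {x : String} {xs : List String} (h : pvBlank x = true) :
    1 ≤ pvRunLenA (x :: xs) := by simp [pvRunLenA, h]

-- outer while of A
def pvGoA (t k : Int) : List String → List String
  | [] => []
  | x :: xs =>
    if hbx : pvBlank x = false then x :: pvGoA t k xs
    else
      let r := pvRunLenA (x :: xs)
      (if (r : Int) > t then List.replicate k.toNat "" else List.replicate r "")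
        ++ pvGoA t k (List.drop r (x :: xs))
termination_by l => l.length
decreasing_by
  · simp
  · have h1 : 1 ≤ pvRunLenA (x :: xs) := pvRunLenA_pos (by simpa using hbx)
    simp [List.length_drop]; omega

def collapse_blank_line_runs_py (lines : List String) (threshold : Int) (keep : Int) : List String :=
  let t := if threshold < 0 then 0 else threshold
  let k := if keep < 0 then 0 else keep
  pvGoA t k lines

-- ===== PORT B =====
-- [''] * (keep if blank > threshold else blank)
def pvPadB (t k : Int) (b : Nat) : List String :=
  if (b : Int) > t then List.replicate k.toNat "" else List.replicate b ""

-- loop body of B's single pass: state = (out, pending blank counter)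
def pvStepB (t k : Int) (st : List String × Nat) (line : String) : List String × Nat :=
  if pvBlank line then (st.1, st.2 + 1)
  else (st.1 ++ pvPadB t k st.2 ++ [line], 0)

def collapse_blank_line_runs_py_alt (lines : List String) (threshold : Int) (keep : Int) : List String :=
  let t := if threshold < 0 then 0 else threshold
  let k := if keep < 0 then 0 else keep
  let st := lines.foldl (pvStepB t k) ([], 0)
  st.1 ++ pvPadB t k st.2

-- ===== PRECONDITION & SPEC =====
def Spec_collapse_blank_line_runs_py (lines : List String) (threshold : Int) (keep : Int) (out : List String) : Prop := out = collapse_blank_line_runs_py_alt lines threshold keep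
instance (lines : List String) (threshold : Int) (keep : Int) (out : List String) : Decidable (Spec_collapse_blank_line_runs_py lines threshold keep out) := by unfold Spec_collapse_blank_line_runs_py; infer_instance

-- ===== CLAIM =====
def Claim_equal_collapse_blank_line_runs_py : Prop := ∀ (lines : List String) (threshold : Int) (keep : Int), Dom_collapse_blank_line_runs_py lines threshold keep → Spec_collapse_blank_line_runs_py lines threshold keep (collapse_blank_line_runs_py lines threshold keep)

-- ===== LEMMAS AND PROOFS =====

-- run-based reading of B's counter loop
def pvG (t k : Int) (b : Nat) : List String → List String
  | [] => pvPadB t k b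
  | x :: xs => if pvBlank x then pvG t k (b + 1) xs else pvPadB t k b ++ x :: pvG t k 0 xs

theorem pvFoldB_eq_pvG (t k : Int) (l : List String) :
    ∀ (acc : List String) (b : Nat),
      (l.foldl (pvStepB t k) (acc, b)).1 ++ pvPadB t k (l.foldl (pvStepB t k) (acc, b)).2
        = acc ++ pvG t k b l := by
  induction l with
  | nil => intro acc b; simp [pvG]
  | cons x xs ih =>
    intro acc b
    rw [List.foldl_cons]
    by_cases h : pvBlank x = true
    · rw [pvG, if_pos h]
      simp only [pvStepB, if_pos h]
      exact ih acc (b + 1)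
    · rw [pvG, if_neg h]
      simp only [pvStepB, if_neg h]
      rw [ih]
      simp

theorem pvGoA_run (t k : Int) (ht : 0 ≤ t) (xs : List String) :
    pvGoA t k xs
      = pvPadB t k (pvRunLenA xs) ++ pvGoA t k (List.drop (pvRunLenA xs) xs) := by
  cases xs with
  | nil => simp [pvGoA, pvRunLenA, pvPadB, ht]
  | cons x xs =>
    by_cases h : pvBlank x = true
    · rw [pvGoA]
      simp [h, pvPadB]
    · rw [pvRunLenA]
      simp [h, pvPadB]
      omega

theorem pvG_eq_pvGoA (t k : Int) (ht : 0 ≤ t) (xs : List String) :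
    ∀ b : Nat, pvG t k b xs
      = pvPadB t k (b + pvRunLenA xs) ++ pvGoA t k (List.drop (pvRunLenA xs) xs) := by
  induction xs with
  | nil => intro b; simp [pvG, pvRunLenA, pvGoA]
  | cons x xs ih =>
    intro b
    by_cases h : pvBlank x = true
    · rw [pvG, if_pos h, ih (b + 1), pvRunLenA, if_pos h]
      have : b + 1 + pvRunLenA xs = b + (pvRunLenA xs + 1) := by omega
      rw [this]
      simp
    · rw [pvG, if_neg h, pvRunLenA, if_neg h]
      rw [ih 0]
      simp only [Nat.zero_add, Nat.add_zero, List.drop_zero]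
      rw [← pvGoA_run t k ht xs, pvGoA]
      simp [h]

theorem pvMain (t k : Int) (ht : 0 ≤ t) (lines : List String) :
    pvGoA t k lines
      = (lines.foldl (pvStepB t k) ([], 0)).1
          ++ pvPadB t k (lines.foldl (pvStepB t k) ([], 0)).2 := by
  rw [pvFoldB_eq_pvG, pvG_eq_pvGoA t k ht lines 0]
  simp only [Nat.zero_add, List.nil_append]
  exact pvGoA_run t k ht lines

-- ===== VERDICT =====
theorem collapse_blank_line_runs_py_spec : Claim_equal_collapse_blank_line_runs_py := by
  intro lines threshold keep _
  unfold Spec_collapse_blank_line_runs_py collapse_blank_line_runs_py collapse_blank_line_runs_py_alt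
  exact pvMain _ _ (by split <;> omega) lines
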